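-- pv_equiv track=rewrite | github.com/sana197111/azure-function-Rest-API- | function_app.py | bfs
-- ===== SOURCE A (Python) =====
-- from collections import deque
--
-- def bfs(adj_matrix, start_node, referencing_nodes, node_to_index, index_to_node, depth_limit=3):
--     start_index = node_to_index[start_node]
--     visited = [False] * len(adj_matrix)
--     queue = deque([(start_index, 0, None)])  # 부모 노드 정보 추가
--     results = []
--
--     # 참조하는 상위 노드를 결과에 먼저 추가
--     for ref_node in referencing_nodes:
--         ref_index = node_to_index[ref_node]
--         results.append((ref_node, -1, None))  # 상위 노드의 depth를 -1로 설정
--         visited[ref_index] = True  # 상위 노드를 방문 처리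
--
--     while queue:
--         current_index, current_depth, parent_node = queue.popleft()
--         if not visited[current_index] and current_depth <= depth_limit:
--             visited[current_index] = True
--             current_node = index_to_node[current_index]
--             results.append((current_node, current_depth, parent_node))
--
--             for neighbor_index, is_connected in enumerate(adj_matrix[current_index]):
--                 if is_connected and not visited[neighbor_index]:
--                     queue.append((neighbor_index, current_depth + 1, current_node))
--
--     return results
-- ===== SOURCE B (Python) =====
-- def bfs(adj_matrix, start_node, referencing_nodes, node_to_index, index_to_node, depth_limit=3):
--     start_index = node_to_index[start_node]
--     visited = [False] * len(adj_matrix)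
--     results = []
--
--     # seed: referencing (parent) nodes go first at depth -1 and are marked visited
--     for ref_node in referencing_nodes:
--         ref_index = node_to_index[ref_node]
--         results.append((ref_node, -1, None))
--         visited[ref_index] = True
--
--     # level-synchronous BFS: one frontier per depth, no queue and no per-entry depth tag
--     frontier = [(start_index, None)]
--     depth = 0
--     while frontier and depth <= depth_limit:
--         next_frontier = []
--         for node_index, parent in frontier:
--             if visited[node_index]:
--                 continue
--             visited[node_index] = True
--             node = index_to_node[node_index]
--             results.append((node, depth, parent))
--             for j, connected in enumerate(adj_matrix[node_index]):
--                 if connected and not visited[j]: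
--                     next_frontier.append((j, node))
--         frontier = next_frontier
--         depth += 1
--     return results
-- ===== Notes on version B (the rewrite author's own statement) =====
-- stated objective: alternative
-- what changed: A's single deque of (index, depth, parent) triples is replaced by a level-synchronous BFS: an outer depth loop over untagged per-level frontiers, with the inner frontier scan collecting the next frontier, so no queue and no per-entry depth tag exist.
-- outside the precondition, e.g. on bfs([[0]], 'a', [], {'a': -1}, {-1: 'a'}, 0): A returns [('a', 0, None)], B returns [('a', 0, None)]
import Mathlib
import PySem

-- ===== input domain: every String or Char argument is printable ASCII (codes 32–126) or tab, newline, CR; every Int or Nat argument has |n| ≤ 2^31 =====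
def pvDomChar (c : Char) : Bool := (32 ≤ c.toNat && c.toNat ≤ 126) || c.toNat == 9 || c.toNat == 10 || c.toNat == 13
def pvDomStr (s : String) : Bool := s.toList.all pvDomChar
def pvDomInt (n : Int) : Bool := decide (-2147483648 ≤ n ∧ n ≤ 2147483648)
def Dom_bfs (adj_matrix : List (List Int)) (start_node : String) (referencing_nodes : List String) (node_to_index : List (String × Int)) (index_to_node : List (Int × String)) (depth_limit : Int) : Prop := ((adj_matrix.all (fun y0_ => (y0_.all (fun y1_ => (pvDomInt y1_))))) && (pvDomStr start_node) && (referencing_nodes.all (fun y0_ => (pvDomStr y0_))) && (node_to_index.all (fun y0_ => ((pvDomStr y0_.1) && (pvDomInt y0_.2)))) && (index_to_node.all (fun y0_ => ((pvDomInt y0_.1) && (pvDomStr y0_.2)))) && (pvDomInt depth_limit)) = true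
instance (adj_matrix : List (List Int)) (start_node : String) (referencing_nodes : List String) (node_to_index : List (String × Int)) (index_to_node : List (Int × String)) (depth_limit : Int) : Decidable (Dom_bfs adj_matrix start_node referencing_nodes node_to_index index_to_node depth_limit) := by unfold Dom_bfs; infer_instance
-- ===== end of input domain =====

-- B replaces A's single deque of (index, depth, parent) triples by a level-synchronous BFS (one untagged
-- frontier per depth with an outer depth counter); same return value, similar cost ("alternative").

-- termination helper for the port of A (cited in its termination proof)
theorem pv_count_false_set_lt (v : List Bool) (k : Nat) (h : v[k]? = some false) :
    (v.set k true).count false < v.count false := by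
  induction v generalizing k with
  | nil => simp at h
  | cons b t ih =>
    cases k with
    | zero =>
      simp only [List.getElem?_cons_zero, Option.some.injEq] at h
      subst h
      simp [List.count_cons]
    | succ k =>
      simp only [List.getElem?_cons_succ] at h
      have := ih k h
      cases b <;> simp [List.count_cons] <;> omega

theorem pv_count_false_pySetD_lt (v : List Bool) (i : Int)
    (h : PySem.List.pyGet? v i = some false) :
    (PySem.List.pySetD v i true).count false < v.count false := by
  unfold PySem.List.pyGet? at h
  unfold PySem.List.pySetD PySem.List.pySet?
  cases hk : PySem.List.pyIdx? v.length i with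
  | none => rw [hk] at h; simp at h
  | some k =>
    rw [hk] at h
    simp only [Option.bind_some] at h
    simp only [Option.map_some, Option.getD_some]
    exact pv_count_false_set_lt v k h

-- ===== PORT A =====
-- The `none` branches below are reached only where the Python raises
-- (KeyError / IndexError); Pre_bfs excludes those inputs, nothing is claimed there.
def bfsSeedA (node_to_index : List (String × Int)) (refs : List String)
    (acc : List Bool × List (String × Int × Option String)) :
    List Bool × List (String × Int × Option String) :=
  refs.foldl (fun acc ref =>
    match node_to_index.lookup ref with
    | none => acc   -- Python: KeyError
    | some ri => (PySem.List.pySetD acc.1 ri true, acc.2 ++ [(ref, -1, none)])) acc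

def bfsLoopA (adj : List (List Int)) (i2n : List (Int × String)) (dl : Int)
    (visited : List Bool) (queue : List (Int × Int × Option String))
    (results : List (String × Int × Option String)) : List (String × Int × Option String) :=
  match queue with
  | [] => results
  | (ci, cd, pn) :: rest =>
    match hv : PySem.List.pyGet? visited ci with
    | none => results   -- Python: IndexError
    | some vis =>
      if hcond : vis = false ∧ cd ≤ dl then
        let visited' := PySem.List.pySetD visited ci true
        match i2n.lookup ci with
        | none => results   -- Python: KeyError
        | some current_node =>
          let row := (PySem.List.pyGet? adj ci).getD []   -- exact under Pre_ (ci in range)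
          let queue' := (PySem.List.enumerate row 0).foldl
              (fun q jc => if jc.2 ≠ 0 ∧ PySem.List.pyGetD visited' jc.1 true = false
                           then q ++ [(jc.1, cd + 1, some current_node)] else q) rest
          bfsLoopA adj i2n dl visited' queue' (results ++ [(current_node, cd, pn)])
      else bfsLoopA adj i2n dl visited rest results
termination_by (visited.count false, queue.length)
decreasing_by
  · exact Prod.Lex.left _ _ (pv_count_false_pySetD_lt visited ci (hcond.1 ▸ hv))
  · exact Prod.Lex.right _ (by simp)

def bfs (adj_matrix : List (List Int)) (start_node : String) (referencing_nodes : List String) (node_to_index : List (String × Int)) (index_to_node : List (Int × String)) (depth_limit : Int) : List (String × Int × Option String) :=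
  match node_to_index.lookup start_node with
  | none => []   -- Python: KeyError
  | some start_index =>
    let seeded := bfsSeedA node_to_index referencing_nodes
        (List.replicate adj_matrix.length false, [])
    bfsLoopA adj_matrix index_to_node depth_limit seeded.1 [(start_index, 0, none)] seeded.2

-- ===== PORT B =====
def bfsSeedB (node_to_index : List (String × Int)) (refs : List String)
    (acc : List Bool × List (String × Int × Option String)) :
    List Bool × List (String × Int × Option String) :=
  refs.foldl (fun acc ref =>
    match node_to_index.lookup ref with
    | none => acc   -- Python: KeyError
    | some ri => (PySem.List.pySetD acc.1 ri true, acc.2 ++ [(ref, -1, none)])) acc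

-- inner `for node_index, parent in frontier` loop of B, threading (visited, next_frontier, results)
def bfsScanB (adj : List (List Int)) (i2n : List (Int × String)) (depth : Int) :
    List (Int × Option String) → List Bool → List (Int × Option String) →
    List (String × Int × Option String) →
    List Bool × List (Int × Option String) × List (String × Int × Option String)
  | [], visited, nxt, results => (visited, nxt, results)
  | (i, parent) :: rest, visited, nxt, results =>
    match PySem.List.pyGet? visited i with
    | none => (visited, nxt, results)   -- Python: IndexError
    | some true => bfsScanB adj i2n depth rest visited nxt results   -- continue
    | some false =>
      let visited' := PySem.List.pySetD visited i true
      match i2n.lookup i with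
      | none => (visited', nxt, results)   -- Python: KeyError
      | some node =>
        let row := (PySem.List.pyGet? adj i).getD []   -- exact under Pre_ (i in range)
        let nxt' := (PySem.List.enumerate row 0).foldl
            (fun acc jc => if jc.2 ≠ 0 ∧ PySem.List.pyGetD visited' jc.1 true = false
                           then acc ++ [(jc.1, some node)] else acc) nxt
        bfsScanB adj i2n depth rest visited' nxt' (results ++ [(node, depth, parent)])

-- outer `while frontier and depth <= depth_limit` loop of B
def bfsLevelB (adj : List (List Int)) (i2n : List (Int × String)) (dl : Int) (depth : Int)
    (frontier : List (Int × Option String)) (visited : List Bool)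
    (results : List (String × Int × Option String)) : List (String × Int × Option String) :=
  if frontier = [] ∨ dl < depth then results
  else
    let s := bfsScanB adj i2n depth frontier visited [] results
    bfsLevelB adj i2n dl (depth + 1) s.2.1 s.1 s.2.2
termination_by (dl + 1 - depth).toNat
decreasing_by omega

def bfs_alt (adj_matrix : List (List Int)) (start_node : String) (referencing_nodes : List String) (node_to_index : List (String × Int)) (index_to_node : List (Int × String)) (depth_limit : Int) : List (String × Int × Option String) :=
  match node_to_index.lookup start_node with
  | none => []   -- Python: KeyError
  | some start_index =>
    let seeded := bfsSeedB node_to_index referencing_nodes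
        (List.replicate adj_matrix.length false, [])
    bfsLevelB adj_matrix index_to_node depth_limit 0 [(start_index, none)] seeded.1 seeded.2

-- ===== PRECONDITION & SPEC =====
-- Pre_bfs excludes the inputs where A raises (KeyError on a missing start/reference node or a missing
-- index_to_node key, IndexError on an out-of-range index), and in addition — a stated narrowing — the
-- inputs A only finishes thanks to accidents of its implementation: negative-index wraparound into
-- `visited`, and malformed rows / missing index_to_node keys that the traversal happens never to touch;
-- on all of those A and B coincide where both return, but their values are artefacts.
def Pre_bfs (adj_matrix : List (List Int)) (start_node : String) (referencing_nodes : List String) (node_to_index : List (String × Int)) (index_to_node : List (Int × String)) (depth_limit : Int) : Prop :=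
  (-(adj_matrix.length : Int) ≤ (node_to_index.lookup start_node).getD (adj_matrix.length + 1)
    ∧ (node_to_index.lookup start_node).getD (adj_matrix.length + 1) < (adj_matrix.length : Int))
  ∧ (∀ r ∈ referencing_nodes,
      -(adj_matrix.length : Int) ≤ (node_to_index.lookup r).getD (adj_matrix.length + 1)
      ∧ (node_to_index.lookup r).getD (adj_matrix.length + 1) < (adj_matrix.length : Int))
  ∧ (0 ≤ depth_limit →
      ((∃ r ∈ referencing_nodes,
          PySem.List.pyIdx? adj_matrix.length ((node_to_index.lookup r).getD (adj_matrix.length + 1))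
            = PySem.List.pyIdx? adj_matrix.length ((node_to_index.lookup start_node).getD (adj_matrix.length + 1)))
       ∨ (0 ≤ (node_to_index.lookup start_node).getD (adj_matrix.length + 1)
          ∧ (∀ row ∈ adj_matrix, row.length = adj_matrix.length)
          ∧ (∀ k ∈ List.range adj_matrix.length, (index_to_node.lookup (k : Int)).isSome = true))))
instance (adj_matrix : List (List Int)) (start_node : String) (referencing_nodes : List String) (node_to_index : List (String × Int)) (index_to_node : List (Int × String)) (depth_limit : Int) : Decidable (Pre_bfs adj_matrix start_node referencing_nodes node_to_index index_to_node depth_limit) := by unfold Pre_bfs; infer_instance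

def pvWitness_bfs : List (List Int) × String × List String × (List (String × Int)) × (List (Int × String)) × Int :=
  ([[0, 1], [1, 0]], "a", ["b"], [("a", 0), ("b", 1)], [(0, "a"), (1, "b")], 3)

def Spec_bfs (adj_matrix : List (List Int)) (start_node : String) (referencing_nodes : List String) (node_to_index : List (String × Int)) (index_to_node : List (Int × String)) (depth_limit : Int) (out : List (String × Int × Option String)) : Prop := out = bfs_alt adj_matrix start_node referencing_nodes node_to_index index_to_node depth_limit
instance (adj_matrix : List (List Int)) (start_node : String) (referencing_nodes : List String) (node_to_index : List (String × Int)) (index_to_node : List (Int × String)) (depth_limit : Int) (out : List (String × Int × Option String)) : Decidable (Spec_bfs adj_matrix start_node referencing_nodes node_to_index index_to_node depth_limit out) := by unfold Spec_bfs; infer_instance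

-- ===== CLAIM (what is proved, stated in full; the proofs are below) =====
def Claim_equal_bfs : Prop := ∀ (adj_matrix : List (List Int)) (start_node : String) (referencing_nodes : List String) (node_to_index : List (String × Int)) (index_to_node : List (Int × String)) (depth_limit : Int), Dom_bfs adj_matrix start_node referencing_nodes node_to_index index_to_node depth_limit → Pre_bfs adj_matrix start_node referencing_nodes node_to_index index_to_node depth_limit → Spec_bfs adj_matrix start_node referencing_nodes node_to_index index_to_node depth_limit (bfs adj_matrix start_node referencing_nodes node_to_index index_to_node depth_limit)

-- ===== LEMMAS AND PROOFS =====

-- the two seed folds are the same fold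
theorem seedA_eq_seedB (n2i : List (String × Int)) (refs : List String)
    (acc : List Bool × List (String × Int × Option String)) :
    bfsSeedA n2i refs acc = bfsSeedB n2i refs acc := rfl

theorem seedB_fst_length (n2i : List (String × Int)) (refs : List String)
    (acc : List Bool × List (String × Int × Option String)) :
    (bfsSeedB n2i refs acc).1.length = acc.1.length := by
  induction refs generalizing acc with
  | nil => rfl
  | cons r rs ih =>
    show (bfsSeedB n2i rs _).1.length = _
    cases h : n2i.lookup r with
    | none => simp only [bfsSeedB, List.foldl_cons, h]; exact ih acc
    | some ri =>
      simp only [bfsSeedB, List.foldl_cons, h]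
      rw [show (List.foldl _ _ rs) = bfsSeedB n2i rs (PySem.List.pySetD acc.1 ri true, acc.2 ++ [(r, -1, none)]) from rfl, ih]
      simp [PySem.List.length_pySetD]

-- `if p then acc ++ [f x] else acc` fold = append of a filtered map
theorem foldl_append_if_map {α β : Type} (p : α → Prop) [DecidablePred p] (f : α → β)
    (l : List α) (init : List β) :
    l.foldl (fun acc x => if p x then acc ++ [f x] else acc) init
      = init ++ (l.filter (fun x => decide (p x))).map f := by
  induction l generalizing init with
  | nil => simp
  | cons x xs ih =>
    by_cases h : p x <;> simp [List.foldl_cons, List.filter_cons, h, ih]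

-- queue entries whose depth exceeds the limit are all dropped
theorem loopA_drop (adj : List (List Int)) (i2n : List (Int × String)) (dl : Int)
    (v : List Bool) (q : List (Int × Int × Option String)) (r : List (String × Int × Option String))
    (hlen : v.length = adj.length)
    (hq : ∀ p ∈ q, (0 ≤ p.1 ∧ p.1 < (adj.length : Int)) ∧ dl < p.2.1) :
    bfsLoopA adj i2n dl v q r = r := by
  induction q with
  | nil => rw [bfsLoopA]
  | cons e rest ih =>
    obtain ⟨ci, cd, pn⟩ := e
    obtain ⟨⟨hci0', hcin'⟩, hcd'⟩ := hq (ci, cd, pn) (by simp)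
    have hci0 : 0 ≤ ci := hci0'
    have hcin : ci < (adj.length : Int) := hcin'
    have hcd : dl < cd := hcd'
    have hg : PySem.List.pyGet? v ci = some (v[ci.toNat]'(by omega)) :=
      PySem.List.pyGet?_eq_some_getElem v hci0 (by omega)
    rw [bfsLoopA]
    split
    · next heq => rw [heq] at hg
    · next vis heq =>
      rw [dif_neg (by intro hc; omega)]
      exact ih (fun p hp => hq p (by simp [hp]))

-- main simulation lemma: A's queue mid-level = B's scan of the rest of the frontier, then next level
theorem mainSim (adj : List (List Int)) (i2n : List (Int × String)) (dl : Int)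
    (hrows : ∀ row ∈ adj, row.length = adj.length)
    (hi2n : ∀ k ∈ List.range adj.length, (i2n.lookup (k : Int)).isSome = true)
    (d : Int) (q1 q2 : List (Int × Option String)) (v : List Bool)
    (r : List (String × Int × Option String))
    (hlen : v.length = adj.length)
    (h1 : ∀ p ∈ q1, 0 ≤ p.1 ∧ p.1 < (adj.length : Int))
    (h2 : ∀ p ∈ q2, 0 ≤ p.1 ∧ p.1 < (adj.length : Int))
    (hd : d ≤ dl) :
    bfsLoopA adj i2n dl v
        (q1.map (fun p => (p.1, d, p.2)) ++ q2.map (fun p => (p.1, d + 1, p.2))) r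
      = (bfsLevelB adj i2n dl (d + 1) (bfsScanB adj i2n d q1 v q2 r).2.1
          (bfsScanB adj i2n d q1 v q2 r).1 (bfsScanB adj i2n d q1 v q2 r).2.2) := by
  cases q1 with
  | nil =>
    show bfsLoopA adj i2n dl v ([] ++ q2.map _) r = bfsLevelB adj i2n dl (d + 1) q2 v r
    rw [List.nil_append, bfsLevelB]
    by_cases hq2 : q2 = []
    · subst hq2; rw [if_pos (Or.inl rfl), List.map_nil, bfsLoopA]
    · by_cases hdl : dl < d + 1
      · rw [if_pos (Or.inr hdl)]
        refine loopA_drop adj i2n dl v _ r hlen ?_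
        intro p hp
        obtain ⟨q, hq, rfl⟩ := List.mem_map.1 hp
        exact ⟨h2 q hq, by change dl < d + 1; omega⟩
      · rw [if_neg (by tauto)]
        obtain ⟨e, q2t, rfl⟩ := List.exists_cons_of_ne_nil hq2
        have hrec := mainSim adj i2n dl hrows hi2n (d + 1) (e :: q2t) [] v r hlen h2
          (by intro p hp; simp at hp) (by omega)
        simpa using hrec
  | cons hd0 rest =>
    obtain ⟨i, p⟩ := hd0
    obtain ⟨hi0', hin'⟩ := h1 (i, p) (by simp)
    have hi0 : 0 ≤ i := hi0'
    have hin : i < (adj.length : Int) := hin'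
    have hito : i.toNat < v.length := by omega
    have hg : PySem.List.pyGet? v i = some (v[i.toNat]'hito) :=
      PySem.List.pyGet?_eq_some_getElem v hi0 (by omega)
    simp only [List.map_cons, List.cons_append]
    rw [bfsLoopA]
    split
    · next heq => rw [heq] at hg; exact absurd hg (by simp)
    · next vis heq =>
      have hvis : vis = v[i.toNat]'hito := by rw [heq] at hg; injection hg
      cases hb : v[i.toNat]'hito with
      | true =>
        have heq' : PySem.List.pyGet? v i = some true := by rw [heq, hvis, hb]
        rw [dif_neg (by rw [hvis, hb]; rintro ⟨h, -⟩; cases h)]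
        have hscan : bfsScanB adj i2n d ((i, p) :: rest) v q2 r
            = bfsScanB adj i2n d rest v q2 r := by
          simp only [bfsScanB]; rw [heq']
        rw [hscan]
        exact mainSim adj i2n dl hrows hi2n d rest q2 v r hlen
          (fun q hq => h1 q (by simp [hq])) h2 hd
      | false =>
        have heq' : PySem.List.pyGet? v i = some false := by rw [heq, hvis, hb]
        rw [dif_pos ⟨by rw [hvis, hb], hd⟩]
        -- the node name exists
        have hlk : (i2n.lookup ((i.toNat : Nat) : Int)).isSome = true :=
          hi2n (i.toNat) (by simp [List.mem_range]; omega)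
        rw [show ((i.toNat : Nat) : Int) = i by omega] at hlk
        obtain ⟨node, hnode⟩ := Option.isSome_iff_exists.1 hlk
        rw [hnode]
        dsimp only
        -- the row is a real row of the matrix
        have hia : i.toNat < adj.length := by omega
        have hrow : (PySem.List.pyGet? adj i).getD [] = adj[i.toNat]'hia := by
          rw [PySem.List.pyGet?_eq_some_getElem adj hi0 (by omega)]; rfl
        have hrlen : (adj[i.toNat]'hia).length = adj.length :=
          hrows _ (List.getElem_mem hia)
        -- both neighbour folds are an append of the same filtered map
        rw [foldl_append_if_map
          (fun jc : Int × Int => jc.2 ≠ 0 ∧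
            PySem.List.pyGetD (PySem.List.pySetD v i true) jc.1 true = false)
          (fun jc => (jc.1, d + 1, some node))]
        have hscan : bfsScanB adj i2n d ((i, p) :: rest) v q2 r
            = bfsScanB adj i2n d rest (PySem.List.pySetD v i true)
                (q2 ++ (((PySem.List.enumerate ((PySem.List.pyGet? adj i).getD []) 0).filter
                  (fun jc => decide (jc.2 ≠ 0 ∧
                    PySem.List.pyGetD (PySem.List.pySetD v i true) jc.1 true = false))).map
                  (fun jc => (jc.1, some node))))
                (r ++ [(node, d, p)]) := by
          simp only [bfsScanB]; rw [heq', hnode]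
          simp only [foldl_append_if_map
            (fun jc : Int × Int => jc.2 ≠ 0 ∧
              PySem.List.pyGetD (PySem.List.pySetD v i true) jc.1 true = false)
            (fun jc => (jc.1, some node))]
        rw [hscan]
        have hnews : ∀ q ∈ (((PySem.List.enumerate ((PySem.List.pyGet? adj i).getD []) 0).filter
              (fun jc => decide (jc.2 ≠ 0 ∧
                PySem.List.pyGetD (PySem.List.pySetD v i true) jc.1 true = false))).map
              (fun jc => (jc.1, (some node : Option String)))),
            0 ≤ q.1 ∧ q.1 < (adj.length : Int) := by
          intro q hq
          obtain ⟨jc, hjc, rfl⟩ := List.mem_map.1 hq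
          have hjc' := List.mem_of_mem_filter hjc
          rw [hrow] at hjc'
          obtain ⟨k, hk, rfl⟩ := (PySem.List.mem_enumerate_iff _ _ _).1 hjc'
          constructor
          · simp
          · simp; omega
        have hrec := mainSim adj i2n dl hrows hi2n d rest
          (q2 ++ (((PySem.List.enumerate ((PySem.List.pyGet? adj i).getD []) 0).filter
            (fun jc => decide (jc.2 ≠ 0 ∧
              PySem.List.pyGetD (PySem.List.pySetD v i true) jc.1 true = false))).map
            (fun jc => (jc.1, some node))))
          (PySem.List.pySetD v i true) (r ++ [(node, d, p)])
          (by rw [PySem.List.length_pySetD]; exact hlen)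
          (fun q hq => h1 q (by simp [hq]))
          (by intro q hq
              rcases List.mem_append.1 hq with h | h
              · exact h2 q h
              · exact hnews q h)
          hd
        rw [← hrec]
        simp [List.map_append, List.map_map, Function.comp_def, List.append_assoc]
termination_by (v.count false, q1.length + 2 * q2.length)
decreasing_by
  · have hq1 : q1 = [] := by assumption
    have hq2e : q2 = e :: q2t := by assumption
    subst hq1; subst hq2e
    simp only [Prod.lex_def, List.length_cons, List.length_nil, true_and]
    omega
  · exact Prod.Lex.left _ _ (pv_count_false_pySetD_lt v i heq')
  · have hq1 : q1 = hd0 :: rest := by assumption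
    subst hq1
    simp only [Prod.lex_def, List.length_cons, true_and]
    omega

-- index-arithmetic helpers for the seeded-visited corner
theorem pyIdx_lt_of_some (n : Nat) (i : Int) (k : Nat)
    (h : PySem.List.pyIdx? n i = some k) : k < n := by
  unfold PySem.List.pyIdx? at h
  split_ifs at h <;> simp only [Option.some.injEq] at h <;> omega

theorem pyIdx_isSome_of_inRange (n : Nat) (i : Int) (h1 : -(n : Int) ≤ i) (h2 : i < (n : Int)) :
    (PySem.List.pyIdx? n i).isSome = true := by
  unfold PySem.List.pyIdx?
  split_ifs <;> simp <;> omega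

theorem pyGet_pySetD_true_of_idx_eq (v : List Bool) (i j : Int) (k : Nat)
    (hj : PySem.List.pyIdx? v.length j = some k)
    (hi : PySem.List.pyIdx? v.length i = some k) :
    PySem.List.pyGet? (PySem.List.pySetD v j true) i = some true := by
  have hk : k < v.length := pyIdx_lt_of_some _ _ _ hj
  unfold PySem.List.pySetD PySem.List.pySet?
  rw [hj]
  simp only [Option.map_some, Option.getD_some]
  unfold PySem.List.pyGet?
  rw [List.length_set, hi]
  simp [List.getElem?_set, hk]

theorem pyGet_true_mono (v : List Bool) (j i : Int)
    (h : PySem.List.pyGet? v i = some true) :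
    PySem.List.pyGet? (PySem.List.pySetD v j true) i = some true := by
  unfold PySem.List.pyGet? at h ⊢
  unfold PySem.List.pySetD PySem.List.pySet?
  cases hj : PySem.List.pyIdx? v.length j with
  | none => simpa using h
  | some m =>
    simp only [Option.map_some, Option.getD_some, List.length_set]
    cases hi : PySem.List.pyIdx? v.length i with
    | none => rw [hi] at h; simp at h
    | some k =>
      rw [hi] at h
      simp only [Option.bind_some] at h ⊢
      rw [List.getElem?_set]
      have hk : k < v.length := pyIdx_lt_of_some _ _ _ hi
      by_cases hmk : m = k
      · simp [hmk, hk]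
      · simp only [if_neg hmk]
        exact h

-- after seeding, the start slot is marked if some referencing node maps to the same slot
theorem seedB_marks (n2i : List (String × Int)) (refs : List String) (si : Int) :
    ∀ (acc : List Bool × List (String × Int × Option String)),
    (PySem.List.pyGet? acc.1 si = some true ∨
      ∃ r ∈ refs, ∃ ri, n2i.lookup r = some ri ∧
        PySem.List.pyIdx? acc.1.length ri = PySem.List.pyIdx? acc.1.length si ∧
        (PySem.List.pyIdx? acc.1.length si).isSome = true) →
    PySem.List.pyGet? (bfsSeedB n2i refs acc).1 si = some true := by
  induction refs with
  | nil =>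
    intro acc h
    rcases h with h | ⟨r, hr, -⟩
    · exact h
    · simp at hr
  | cons r0 rs ih =>
    intro acc h
    show PySem.List.pyGet? (bfsSeedB n2i rs _).1 si = some true
    cases hl : n2i.lookup r0 with
    | none =>
      simp only [bfsSeedB, List.foldl_cons, hl]
      refine ih acc ?_
      rcases h with h | ⟨r, hr, ri, hri, hidx⟩
      · exact Or.inl h
      · rcases List.mem_cons.1 hr with rfl | hr'
        · rw [hri] at hl; cases hl
        · exact Or.inr ⟨r, hr', ri, hri, hidx⟩
    | some ri0 =>
      simp only [bfsSeedB, List.foldl_cons, hl]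
      rw [show (List.foldl _ _ rs) = bfsSeedB n2i rs (PySem.List.pySetD acc.1 ri0 true, acc.2 ++ [(r0, -1, none)]) from rfl]
      rcases h with h | ⟨r, hr, ri, hri, hidx, hsome⟩
      · exact ih _ (Or.inl (pyGet_true_mono acc.1 ri0 si h))
      · rcases List.mem_cons.1 hr with rfl | hr'
        · rw [hri] at hl
          injection hl with hl'
          subst hl'
          obtain ⟨k, hk⟩ := Option.isSome_iff_exists.1 hsome
          exact ih _ (Or.inl (pyGet_pySetD_true_of_idx_eq acc.1 si ri k (hidx.trans hk) hk))
        · refine ih _ (Or.inr ⟨r, hr', ri, hri, ?_, ?_⟩)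
          · simpa [PySem.List.length_pySetD] using hidx
          · simpa [PySem.List.length_pySetD] using hsome

-- ===== VERDICT (by name: the statement is the Claim_ definition above) =====
theorem bfs_spec : Claim_equal_bfs := by
  intro adj start refs n2i i2n dl _hDom hPre
  obtain ⟨⟨hs1, hs2⟩, href, hdeep⟩ := hPre
  show bfs adj start refs n2i i2n dl = bfs_alt adj start refs n2i i2n dl
  cases hlk : n2i.lookup start with
  | none => rw [hlk] at hs2; simp at hs2
  | some si =>
    rw [hlk] at hs1 hs2
    simp only [Option.getD_some] at hs1 hs2
    rw [bfs, bfs_alt, hlk, seedA_eq_seedB]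
    dsimp only
    have hsl : (bfsSeedB n2i refs (List.replicate adj.length false, [])).1.length = adj.length := by
      rw [seedB_fst_length]; exact List.length_replicate
    set sv := (bfsSeedB n2i refs (List.replicate adj.length false, [])).1 with hsv
    set sr := (bfsSeedB n2i refs (List.replicate adj.length false, [])).2 with hsr
    -- the start slot can be read (it is in wrap range)
    have hread : ∃ b, PySem.List.pyGet? sv si = some b := by
      cases hg : PySem.List.pyGet? sv si with
      | none =>
        rw [PySem.List.pyGet?_eq_none_iff] at hg
        exact absurd ⟨by omega, by omega⟩ hg
      | some b => exact ⟨b, rfl⟩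
    obtain ⟨b, hb⟩ := hread
    by_cases hneg : dl < 0
    · -- depth_limit < 0: the single queue entry is dropped; B's while-loop never runs
      rw [bfsLoopA]
      rw [bfsLevelB, if_pos (Or.inr hneg)]
      split
      · rfl
      · next vis heq => rw [dif_neg (by rintro ⟨-, h0⟩; omega), bfsLoopA]
    · rcases hdeep (by omega) with ⟨ref, hrmem, hidx⟩ | ⟨hsi0, hsq, hi2n⟩
      · -- start slot already visited by a referencing node: both return the seed results
        obtain ⟨ri, hri⟩ : ∃ ri, n2i.lookup ref = some ri := by
          cases hr : n2i.lookup ref with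
          | none =>
            have := (href ref hrmem).2
            rw [hr] at this; simp at this
          | some x => exact ⟨x, rfl⟩
        rw [hlk, hri] at hidx
        simp only [Option.getD_some] at hidx
        have hmark : PySem.List.pyGet? sv si = some true := by
          refine seedB_marks n2i refs si _ (Or.inr ⟨ref, hrmem, ri, hri, ?_, ?_⟩)
          · simpa [List.length_replicate] using hidx
          · simpa [List.length_replicate] using
              pyIdx_isSome_of_inRange adj.length si (by omega) (by omega)
        rw [bfsLoopA]
        split
        · next heq => rw [heq] at hmark; exact absurd hmark (by simp)
        · next vis heq =>
          rw [heq] at hmark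
          injection hmark with hmark
          rw [dif_neg (by rintro ⟨hfalse, -⟩; rw [hmark] at hfalse; cases hfalse), bfsLoopA]
          rw [bfsLevelB, if_neg (by push_neg; exact ⟨by simp, by omega⟩)]
          have hscan : bfsScanB adj i2n 0 [(si, none)] sv [] sr = (sv, [], sr) := by
            simp only [bfsScanB]
            rw [show PySem.List.pyGet? sv si = some true from heq.trans (by rw [hmark])]
          rw [hscan]
          rw [bfsLevelB, if_pos (Or.inl rfl)]
      · -- the well-formed case: run the level-by-level simulation from depth 0
        rw [hlk] at hsi0
        simp only [Option.getD_some] at hsi0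
        have hmain := mainSim adj i2n dl hsq hi2n 0 [(si, none)] [] sv sr hsl
          (by intro p hp; simp only [List.mem_singleton] at hp; subst hp; exact ⟨hsi0, hs2⟩)
          (by intro p hp; simp at hp)
          (by omega)
        simp only [List.map_cons, List.map_nil, List.append_nil] at hmain
        rw [bfsLevelB, if_neg (by push_neg; exact ⟨by simp, by omega⟩)]
        exact hmain
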